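-- pv_equiv track=rewrite | github.com/sky-sama/apofai_EXbeat_console | apofai.py | quode
-- ===== SOURCE A (Python) =====
-- def quode(strin:str,unlimited=True):
--   inquote = False
--   dblquote = True
--   strout = ""
--   for char in strin:
--     if inquote:
--       if (char == "\"" and dblquote)or(char == "'" and(not dblquote)):
--         inquote = False
--       if char == " ":
--         if unlimited:
--           strout += "\\x20"
--         else:
--           strout += "\v"
--       else:
--         strout += char
--     else:
--       if char == "\"":
--         inquote = True
--         dblquote = True
--       elif char == "'":
--         inquote = True
--         dblquote = False
--       strout += char
--   if inquote:
--     return "error bad_quotation_marks"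
--   else:
--     return strout
-- ===== SOURCE B (Python) =====
-- import re
--
-- _QUOTED = re.compile(r'"[^"]*"|\'[^\']*\'')
--
-- def quode(strin, unlimited=True):
--     rep = "\\x20" if unlimited else "\v"
--     parts = []
--     pos = 0
--     for m in _QUOTED.finditer(strin):
--         gap = strin[pos:m.start()]
--         if '"' in gap or "'" in gap:
--             return "error bad_quotation_marks"
--         parts.append(gap)
--         parts.append(m.group(0).replace(" ", rep))
--         pos = m.end()
--     tail = strin[pos:]
--     if '"' in tail or "'" in tail:
--         return "error bad_quotation_marks"
--     parts.append(tail)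
--     return "".join(parts)
-- ===== Notes on version B (the rewrite author's own statement) =====
-- stated objective: faster
-- what changed: Replaces A's per-character in-quote/out-of-quote state machine by a re.finditer scan over whole quoted spans: gaps are copied verbatim, matched spans get spaces replaced in one str.replace, and a quote left in any gap signals the unclosed-quote error.
import Mathlib
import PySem

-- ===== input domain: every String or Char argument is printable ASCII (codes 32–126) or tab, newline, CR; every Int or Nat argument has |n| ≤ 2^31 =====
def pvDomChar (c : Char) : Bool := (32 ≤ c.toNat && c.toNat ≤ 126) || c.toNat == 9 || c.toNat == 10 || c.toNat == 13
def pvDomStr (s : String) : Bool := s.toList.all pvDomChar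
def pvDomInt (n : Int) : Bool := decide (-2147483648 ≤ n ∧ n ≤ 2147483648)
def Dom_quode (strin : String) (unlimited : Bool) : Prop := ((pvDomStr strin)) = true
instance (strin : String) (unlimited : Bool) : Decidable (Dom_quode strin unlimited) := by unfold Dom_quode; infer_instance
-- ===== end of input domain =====

-- B replaces A's per-character quote state machine by a regex-span scan (idiomatic); same value on every input.

-- ===== PORT A =====
-- one loop iteration of A: state = (inquote, dblquote, strout)
def quodeStep (unlimited : Bool) (s : Bool × Bool × List Char) (char : Char) : Bool × Bool × List Char :=
  match s with
  | (inquote, dblquote, strout) =>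
    if inquote then
      let inquote' := if (char = '"' ∧ dblquote) ∨ (char = '\'' ∧ ¬ dblquote) then false else inquote
      if char = ' ' then
        if unlimited then (inquote', dblquote, strout ++ ['\\','x','2','0'])
        else (inquote', dblquote, strout ++ ['\x0b'])
      else (inquote', dblquote, strout ++ [char])
    else
      if char = '"' then (true, true, strout ++ [char])
      else if char = '\'' then (true, false, strout ++ [char])
      else (inquote, dblquote, strout ++ [char])

def quode (strin : String) (unlimited : Bool) : String :=
  let st := strin.toList.foldl (quodeStep unlimited) (false, true, ([] : List Char))
  if st.1 then "error bad_quotation_marks" else String.mk st.2.2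

-- ===== PORT B =====
def quodeRep (unlimited : Bool) : List Char := if unlimited then ['\\','x','2','0'] else ['\x0b']

-- hand-port of re.finditer with pattern `"[^"]*"|'[^']*'`: at each position, a quote with a
-- same-type closer starts a match (leftmost, shortest closing — exact for this pattern);
-- other characters are gap characters, and a gap quote means the error (as in Source B).
def quodeScan (rep : List Char) : List Char → Option (List Char)
  | [] => some []
  | c :: rest =>
    if c = '"' ∨ c = '\'' then
      if rest.contains c then
        let span := rest.takeWhile (fun ch => ch ≠ c)
        let rest' := (rest.dropWhile (fun ch => ch ≠ c)).tail
        (quodeScan rep rest').map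
          (fun t => c :: (span.flatMap (fun ch => if ch = ' ' then rep else [ch]) ++ (c :: t)))
      else none
    else (quodeScan rep rest).map (fun t => c :: t)
termination_by l => l.length
decreasing_by
  · have h1 := List.length_dropWhile_le (fun ch => decide (ch ≠ c)) rest
    have h2 : ((rest.dropWhile (fun ch => decide (ch ≠ c))).tail).length = (rest.dropWhile (fun ch => decide (ch ≠ c))).length - 1 := List.length_tail
    simp only [List.length_cons]
    omega
  · simp only [List.length_cons]; omega

def quode_alt (strin : String) (unlimited : Bool) : String :=
  match quodeScan (quodeRep unlimited) strin.toList with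
  | some out => String.mk out
  | none => "error bad_quotation_marks"

-- ===== PRECONDITION & SPEC =====
def Spec_quode (strin : String) (unlimited : Bool) (out : String) : Prop := out = quode_alt strin unlimited
instance (strin : String) (unlimited : Bool) (out : String) : Decidable (Spec_quode strin unlimited out) := by unfold Spec_quode; infer_instance

-- ===== CLAIM (what is proved, stated in full; the proofs are below) =====
def Claim_equal_quode : Prop := ∀ (strin : String) (unlimited : Bool), Dom_quode strin unlimited → Spec_quode strin unlimited (quode strin unlimited)

-- ===== LEMMAS AND PROOFS =====

lemma quode_step_in (unlimited db : Bool) (acc : List Char) (c : Char)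
    (h : ¬ ((c = '"' ∧ db) ∨ (c = '\'' ∧ ¬ db))) :
    quodeStep unlimited (true, db, acc) c
      = (true, db, acc ++ (if c = ' ' then quodeRep unlimited else [c])) := by
  simp only [quodeStep, quodeRep, if_neg h, if_pos trivial]
  split_ifs <;> simp_all

lemma quode_step_close (unlimited db : Bool) (acc : List Char) (q : Char)
    (h : (q = '"' ∧ db) ∨ (q = '\'' ∧ ¬ db)) :
    quodeStep unlimited (true, db, acc) q = (false, db, acc ++ [q]) := by
  have hsp : q ≠ ' ' := by rcases h with ⟨rfl, _⟩ | ⟨rfl, _⟩ <;> decide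
  rcases h with ⟨rfl, hdb⟩ | ⟨rfl, hdb⟩ <;> simp [quodeStep, hdb]

lemma quode_inside_noclose (unlimited : Bool) (q : Char) :
    ∀ (l : List Char) (acc : List Char) (db : Bool),
      ((q = '"' ∧ db) ∨ (q = '\'' ∧ ¬ db)) → q ∉ l →
      (l.foldl (quodeStep unlimited) (true, db, acc)).1 = true := by
  intro l
  induction l with
  | nil => intro acc db _ _; simp
  | cons c rest ih =>
    intro acc db hdb hmem
    simp only [List.mem_cons, not_or] at hmem
    have hc : ¬ ((c = '"' ∧ db) ∨ (c = '\'' ∧ ¬ db)) := by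
      rcases hdb with ⟨rfl, h⟩ | ⟨rfl, h⟩ <;> simp_all <;> intro h' <;> exact (hmem.1 h'.symm).elim
    simp only [List.foldl_cons, quode_step_in unlimited db acc c hc]
    exact ih _ db hdb hmem.2

lemma quode_inside_close (unlimited : Bool) (q : Char) :
    ∀ (l : List Char) (acc : List Char) (db : Bool),
      ((q = '"' ∧ db) ∨ (q = '\'' ∧ ¬ db)) → q ∈ l →
      l.foldl (quodeStep unlimited) (true, db, acc)
        = ((l.dropWhile (fun ch => ch ≠ q)).tail).foldl (quodeStep unlimited)
            (false, db,
              acc ++ (l.takeWhile (fun ch => ch ≠ q)).flatMap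
                       (fun ch => if ch = ' ' then quodeRep unlimited else [ch]) ++ [q]) := by
  intro l
  induction l with
  | nil => intro acc db _ h; simp at h
  | cons c rest ih =>
    intro acc db hdb hmem
    by_cases hcq : c = q
    · subst hcq
      simp only [List.foldl_cons, quode_step_close unlimited db acc c hdb,
        List.dropWhile_cons, List.takeWhile_cons]
      simp
    · have hc : ¬ ((c = '"' ∧ db) ∨ (c = '\'' ∧ ¬ db)) := by
        rcases hdb with ⟨rfl, h⟩ | ⟨rfl, h⟩ <;> simp_all
      have hmem' : q ∈ rest := by
        rcases List.mem_cons.mp hmem with h | h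
        · exact absurd h.symm hcq
        · exact h
      simp only [List.foldl_cons, quode_step_in unlimited db acc c hc,
        List.dropWhile_cons, List.takeWhile_cons]
      have hne : (decide (c ≠ q)) = true := by simp [hcq]
      rw [ih _ db hdb hmem']
      simp [hne, List.append_assoc]

lemma quode_main_aux (unlimited : Bool) :
    ∀ (n : Nat) (l : List Char), l.length ≤ n → ∀ (acc : List Char) (db : Bool),
      (let st := l.foldl (quodeStep unlimited) (false, db, acc)
       if st.1 then none else some st.2.2)
        = (quodeScan (quodeRep unlimited) l).map (fun t => acc ++ t) := by
  intro n
  induction n with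
  | zero =>
    intro l hl acc db
    have : l = [] := List.eq_nil_of_length_eq_zero (Nat.le_zero.mp hl)
    subst this; simp [quodeScan]
  | succ n ih =>
    intro l hl acc db
    match l with
    | [] => simp [quodeScan]
    | c :: rest =>
      simp only [List.length_cons, Nat.succ_le_succ_iff] at hl
      by_cases hq : c = '"' ∨ c = '\''
      · -- c opens a quote in A; in B it is a match start or a stray quote
        have hdb' : ((c = '"' ∧ (c = '"' : Bool)) ∨ (c = '\'' ∧ ¬ ((c = '"' : Bool)))) := by
          rcases hq with rfl | rfl <;> simp
        have hstep : quodeStep unlimited (false, db, acc) c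
            = (true, (c = '"' : Bool), acc ++ [c]) := by
          rcases hq with rfl | rfl <;> simp [quodeStep]
        by_cases hin : c ∈ rest
        · have hcont : rest.contains c = true := by simpa using hin
          have hclose := quode_inside_close unlimited c rest (acc ++ [c]) _ hdb' hin
          have hlen : ((rest.dropWhile (fun ch => ch ≠ c)).tail).length ≤ n := by
            have h1 := List.length_dropWhile_le (fun ch => decide (ch ≠ c)) rest
            have h2 : ((rest.dropWhile (fun ch => decide (ch ≠ c))).tail).length
                = (rest.dropWhile (fun ch => decide (ch ≠ c))).length - 1 := List.length_tail
            omega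
          have := ih _ hlen
              (acc ++ [c] ++ (rest.takeWhile (fun ch => ch ≠ c)).flatMap
                 (fun ch => if ch = ' ' then quodeRep unlimited else [ch]) ++ [c]) (c = '"' : Bool)
          simp only [List.foldl_cons, hstep, hclose, this]
          rw [quodeScan]
          simp only [if_pos hq, hcont]
          cases quodeScan (quodeRep unlimited) ((rest.dropWhile (fun ch => ch ≠ c)).tail) <;>
            simp [List.append_assoc]
        · have hnc := quode_inside_noclose unlimited c rest (acc ++ [c]) _ hdb' hin
          have hcont : rest.contains c = false := by simpa using hin
          simp only [List.foldl_cons, hstep]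
          rw [quodeScan]
          simp only [if_pos hq, hcont]
          simp [hnc]
      · -- ordinary gap character
        have hstep : quodeStep unlimited (false, db, acc) c = (false, db, acc ++ [c]) := by
          simp only [not_or] at hq
          simp [quodeStep, hq.1, hq.2]
        have := ih rest hl (acc ++ [c]) db
        simp only [List.foldl_cons, hstep, this]
        rw [quodeScan]
        simp only [if_neg hq, Option.map_map]
        cases quodeScan (quodeRep unlimited) rest <;> simp

lemma quode_main (unlimited : Bool) :
    ∀ (l acc : List Char) (db : Bool),
      (let st := l.foldl (quodeStep unlimited) (false, db, acc)
       if st.1 then none else some st.2.2)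
        = (quodeScan (quodeRep unlimited) l).map (fun t => acc ++ t) :=
  fun l acc db => quode_main_aux unlimited l.length l (Nat.le_refl _) acc db

-- ===== VERDICT (by name: the statement is the Claim_ definition above) =====
theorem quode_spec : Claim_equal_quode := by
  intro strin unlimited _
  unfold Spec_quode quode quode_alt
  have h := quode_main unlimited strin.toList [] true
  simp only at h
  cases hs : quodeScan (quodeRep unlimited) strin.toList with
  | none => rw [hs] at h; simp at h; simp [h]
  | some t => rw [hs] at h; simp at h; simp [h.1, h.2]
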